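-- pv_equiv track=rewrite | github.com/YangGuo57/COMP-1510-Term-Project | map_functions.py | generate_game_map
-- ===== SOURCE A (Python) =====
-- def generate_game_map(game_board):
--     for (x, y), location in game_board.items():
--         if location == "hospital":
--             game_board[(x, y)] = 'H'
--             update_surroundings(game_board, x, y, '|', '+', 'H')
--         elif location == "school":
--             game_board[(x, y)] = 'S'
--             update_surroundings(game_board, x, y, '|', '-', 'S')
--         elif location == "park":
--             game_board[(x, y)] = 'P'
--             update_surroundings(game_board, x, y, '|', '=', 'P')
--         elif location == "work":
--             game_board[(x, y)] = 'W'
--             update_surroundings(game_board, x, y, '|', '~', 'W')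
--
--     return game_board
--
-- def update_surroundings(game_board, x, y, door, wall, location_symbol):
--     for i in range(x - 1, x + 2):
--         for j in range(y - 1, y + 2):
--             if (i, j) in game_board and game_board[(i, j)] != location_symbol:
--                 game_board[(i, j)] = door
--
--     for j in range(y - 1, y + 2):
--         for i in [x - 1, x + 1]:
--             if (i, j) in game_board and game_board[(i, j)] != location_symbol:
--                 game_board[(i, j)] = wall
-- ===== SOURCE B (Python) =====
-- SPEC = {"hospital": ('H', '+'), "school": ('S', '-'), "park": ('P', '='), "work": ('W', '~')}
--
--
-- def generate_game_map(game_board):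
--     for (x, y), location in game_board.items():
--         if location in SPEC:
--             symbol, wall = SPEC[location]
--             game_board[(x, y)] = symbol
--             # single pass over the 3x3 block: wall on the x-1/x+1 rows, door elsewhere
--             for i in range(x - 1, x + 2):
--                 for j in range(y - 1, y + 2):
--                     if (i, j) in game_board and game_board[(i, j)] != symbol:
--                         game_board[(i, j)] = wall if i != x else '|'
--     return game_board
-- ===== Notes on version B (the rewrite author's own statement) =====
-- stated objective: simpler
-- what changed: B replaces update_surroundings' two sweeps (a door pass over the whole 3x3 block, then a wall overwrite pass over the x-1/x+1 columns) with a single 3x3 pass that writes wall or door directly, and replaces the four-branch if/elif chain with one table lookup.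
-- outside the precondition, e.g. on generate_game_map({(1, 2): 'park', (3,): 'road'}): A raises ValueError, B raises ValueError
import Mathlib
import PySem

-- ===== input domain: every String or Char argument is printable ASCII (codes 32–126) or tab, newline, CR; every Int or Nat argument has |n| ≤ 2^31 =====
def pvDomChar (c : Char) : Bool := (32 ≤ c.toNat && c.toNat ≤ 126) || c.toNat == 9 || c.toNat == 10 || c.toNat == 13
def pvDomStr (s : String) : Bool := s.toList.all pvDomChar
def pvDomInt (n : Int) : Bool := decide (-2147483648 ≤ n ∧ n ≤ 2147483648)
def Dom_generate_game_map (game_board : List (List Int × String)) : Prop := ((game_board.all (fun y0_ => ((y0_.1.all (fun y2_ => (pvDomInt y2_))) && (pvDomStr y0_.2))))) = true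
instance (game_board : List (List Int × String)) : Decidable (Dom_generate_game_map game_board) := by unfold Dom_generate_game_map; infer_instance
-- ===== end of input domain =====

-- ===== PORT A =====
-- A mutates its dict argument in place and returns it; the equivalence proved here is about the
-- returned mapping (B performs the same in-place mutation in Python).
-- Python iterates the live dict; no keys are added or removed, so the visit order is the original
-- key order and each value is read at visit time: ported as a fold over the key list reading getD.
def pv_update_surroundings (d : PySem.Dict (List Int) String) (x y : Int)
    (door wall location_symbol : String) : PySem.Dict (List Int) String :=
  let d1 := (PySem.List.pyRange (x - 1) (x + 2) 1).foldl (fun d i =>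
    (PySem.List.pyRange (y - 1) (y + 2) 1).foldl (fun d j =>
      match d.get? [i, j] with
      | some w => if w ≠ location_symbol then d.insert [i, j] door else d
      | none => d) d) d
  (PySem.List.pyRange (y - 1) (y + 2) 1).foldl (fun d j =>
    [x - 1, x + 1].foldl (fun d i =>
      match d.get? [i, j] with
      | some w => if w ≠ location_symbol then d.insert [i, j] wall else d
      | none => d) d) d1

def generate_game_map (game_board : List (List Int × String)) : List (List Int × String) :=
  let d0 : PySem.Dict (List Int) String := PySem.Dict.mk game_board
  (d0.keys.foldl (fun d k =>
    match k with
    | [x, y] =>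
      let location := d.getD k ""
      if location = "hospital" then pv_update_surroundings (d.insert k "H") x y "|" "+" "H"
      else if location = "school" then pv_update_surroundings (d.insert k "S") x y "|" "-" "S"
      else if location = "park" then pv_update_surroundings (d.insert k "P") x y "|" "=" "P"
      else if location = "work" then pv_update_surroundings (d.insert k "W") x y "|" "~" "W"
      else d
    | _ => d  -- Python raises ValueError unpacking a key that is not a pair; excluded by Pre_
    ) d0).items

-- ===== PORT B =====
def pvSPEC : PySem.Dict String (String × String) :=
  PySem.Dict.mk [("hospital", ("H", "+")), ("school", ("S", "-")), ("park", ("P", "=")), ("work", ("W", "~"))]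

-- single pass over the 3x3 block: wall on the x-1/x+1 rows, door '|' on the x row
def pv_mark_block (d : PySem.Dict (List Int) String) (x y : Int)
    (symbol wall : String) : PySem.Dict (List Int) String :=
  (PySem.List.pyRange (x - 1) (x + 2) 1).foldl (fun d i =>
    (PySem.List.pyRange (y - 1) (y + 2) 1).foldl (fun d j =>
      match d.get? [i, j] with
      | some w => if w ≠ symbol then d.insert [i, j] (if i ≠ x then wall else "|") else d
      | none => d) d) d

def generate_game_map_alt (game_board : List (List Int × String)) : List (List Int × String) :=
  let d0 : PySem.Dict (List Int) String := PySem.Dict.mk game_board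
  (d0.keys.foldl (fun d k =>
    match k with
    | [] => d     -- Python raises ValueError unpacking a key that is not a pair; excluded by Pre_
    | [_] => d
    | [x, y] =>
      match pvSPEC.get? (d.getD k "") with
      | some (symbol, wall) => pv_mark_block (d.insert k symbol) x y symbol wall
      | none => d
    | _ :: _ :: _ :: _ => d
    ) d0).items

-- ===== PRECONDITION & SPEC =====
-- Pre_ excludes association lists with duplicate keys (a Python dict cannot hold them; the list
-- collapses accidentally when marshalled) and keys that are not pairs, on which A raises ValueError
-- when unpacking the loop variable.
def Pre_generate_game_map (game_board : List (List Int × String)) : Prop :=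
  (game_board.map Prod.fst).Nodup ∧ ∀ p ∈ game_board, p.1.length = 2
instance (game_board : List (List Int × String)) : Decidable (Pre_generate_game_map game_board) := by
  unfold Pre_generate_game_map; infer_instance
def pvWitness_generate_game_map : (List (List Int × String)) :=
  [([0, 0], "hospital"), ([0, 1], "road"), ([1, 1], "school")]
def Spec_generate_game_map (game_board : List (List Int × String)) (out : List (List Int × String)) : Prop := out = generate_game_map_alt game_board
instance (game_board : List (List Int × String)) (out : List (List Int × String)) : Decidable (Spec_generate_game_map game_board out) := by unfold Spec_generate_game_map; infer_instance

-- ===== CLAIM (what is proved, stated in full; the proofs are below) =====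
def Claim_equal_generate_game_map : Prop := ∀ (game_board : List (List Int × String)), Dom_generate_game_map game_board → Pre_generate_game_map game_board → Spec_generate_game_map game_board (generate_game_map game_board)
-- ===== LEMMAS AND PROOFS =====
def pvE (k : List Int) (sym v : String) (p : List Int × String) : List Int × String :=
  if p.1 = k ∧ p.2 ≠ sym then (k, v) else p

def pvCU (k : List Int) (sym v : String) (d : PySem.Dict (List Int) String) : PySem.Dict (List Int) String :=
  match d.get? k with
  | some w => if w ≠ sym then d.insert k v else d
  | none => d

lemma pyRange3 (t : Int) : PySem.List.pyRange (t - 1) (t + 2) 1 = [t - 1, t, t + 1] := by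
  rw [PySem.List.pyRange_one_cons (by omega), show t - 1 + 1 = t by ring,
      PySem.List.pyRange_one_cons (by omega),
      PySem.List.pyRange_one_cons (by omega), show t + 1 + 1 = t + 2 by ring,
      PySem.List.pyRange_one_eq_nil (by omega)]

lemma pvCU_items (k : List Int) (sym v : String) (d : PySem.Dict (List Int) String)
    (h : d.keys.Nodup) : (pvCU k sym v d).items = d.items.map (pvE k sym v) := by
  unfold pvCU
  cases hk : d.get? k with
  | none =>
    have hnk : k ∉ d.keys := (PySem.Dict.get?_eq_none_iff_not_mem_keys d k).mp hk
    symm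
    conv_rhs => rw [← List.map_id d.items]
    refine List.map_eq_map_iff.mpr (fun p hp => ?_)
    have hm : p.1 ∈ d.keys := PySem.Dict.mem_keys_of_mem_items d hp
    unfold pvE
    rw [if_neg]; · rfl
    rintro ⟨h1, -⟩
    exact hnk (h1 ▸ hm)
  | some w =>
    show (if w ≠ sym then d.insert k v else d).items = _
    by_cases hw : w = sym
    · subst hw
      simp only [ne_eq, not_true_eq_false, if_false]
      symm
      conv_rhs => rw [← List.map_id d.items]
      refine List.map_eq_map_iff.mpr (fun p hp => ?_)
      unfold pvE
      rw [if_neg]; · rfl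
      rintro ⟨h1, h2⟩
      have := PySem.Dict.get?_of_mem_items d (h1 ▸ hp : (k, p.2) ∈ d.items) h
      rw [hk] at this
      exact h2 (Option.some.inj this).symm
    · rw [if_pos hw]
      have hc : d.contains k = true := by
        rw [PySem.Dict.contains_eq_isSome_get?, hk]; rfl
      rw [PySem.Dict.items_insert_of_contains d v hc]
      refine List.map_congr_left (fun p hp => ?_)
      unfold pvE
      by_cases h1 : p.1 = k
      · have := PySem.Dict.get?_of_mem_items d (h1 ▸ hp : (k, p.2) ∈ d.items) h
        rw [hk] at this
        have h2 : p.2 = w := (Option.some.inj this).symm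
        rw [if_pos (beq_iff_eq.mpr h1), if_pos ⟨h1, by rw [h2]; exact hw⟩]
      · rw [if_neg (by simpa using h1), if_neg (fun hh => h1 hh.1)]

lemma pvE_fst (k : List Int) (sym v : String) (p : List Int × String) :
    (pvE k sym v p).1 = p.1 := by
  unfold pvE; split_ifs with h1
  · exact h1.1.symm
  · rfl

lemma pvCU_keys (k : List Int) (sym v : String) (d : PySem.Dict (List Int) String)
    (h : d.keys.Nodup) : (pvCU k sym v d).keys = d.keys := by
  simp only [PySem.Dict.keys, pvCU_items k sym v d h, List.map_map]
  exact List.map_congr_left (fun p _ => pvE_fst k sym v p)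

def pvMapish (F : PySem.Dict (List Int) String → PySem.Dict (List Int) String)
    (e : List Int × String → List Int × String) : Prop :=
  ∀ d : PySem.Dict (List Int) String, d.keys.Nodup → (F d).items = d.items.map e ∧ (F d).keys = d.keys

lemma pvMapish_CU (k : List Int) (sym v : String) : pvMapish (pvCU k sym v) (pvE k sym v) :=
  fun d h => ⟨pvCU_items k sym v d h, pvCU_keys k sym v d h⟩

lemma pvMapish_foldl {α : Type} (l : List α)
    (step : PySem.Dict (List Int) String → α → PySem.Dict (List Int) String)
    (estep : List Int × String → α → List Int × String)
    (h : ∀ t ∈ l, pvMapish (fun d => step d t) (fun p => estep p t)) :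
    pvMapish (fun d => List.foldl step d l) (fun p => List.foldl estep p l) := by
  induction l with
  | nil =>
    intro d hd
    exact ⟨by simp, rfl⟩
  | cons a l ih =>
    intro d hd
    obtain ⟨ia, ka⟩ := h a (List.mem_cons_self) d hd
    obtain ⟨il, kl⟩ := ih (fun t ht => h t (List.mem_cons_of_mem a ht)) (step d a) (by rw [ka]; exact hd)
    refine ⟨?_, ?_⟩
    · simp only [List.foldl_cons]
      rw [il, ia, List.map_map]
      rfl
    · simp only [List.foldl_cons]
      rw [kl, ka]


lemma pvE_hit {kk k : List Int} {sym v w : String} (h1 : kk = k) (h2 : ¬ w = sym) :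
    pvE k sym v (kk, w) = (k, v) := by
  unfold pvE; exact if_pos ⟨h1, h2⟩

lemma pvE_miss {kk k : List Int} {sym v w : String} (h : ¬ kk = k) :
    pvE k sym v (kk, w) = (kk, w) := by
  unfold pvE; exact if_neg (fun hc => h hc.1)

lemma pvE_stay {kk k : List Int} {sym v w : String} (h : w = sym) :
    pvE k sym v (kk, w) = (kk, w) := by
  unfold pvE; exact if_neg (fun hc => hc.2 h)

set_option maxHeartbeats 1000000 in
lemma pv_mark_eq (d : PySem.Dict (List Int) String) (x y : Int) (sym wall : String)
    (hnd : d.keys.Nodup) (hds : ¬ ("|" = sym)) :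
    pv_update_surroundings d x y "|" wall sym = pv_mark_block d x y sym wall := by
  apply PySem.Dict.ext
  unfold pv_update_surroundings pv_mark_block
  rw [pyRange3 x, pyRange3 y]
  dsimp only
  have h1 : ∀ dd : PySem.Dict (List Int) String, dd.keys.Nodup →
      (List.foldl (fun d i => List.foldl (fun d j =>
          match d.get? [i, j] with
          | some w => if w ≠ sym then d.insert [i, j] "|" else d
          | none => d) d [y - 1, y, y + 1]) dd [x - 1, x, x + 1]).items
        = dd.items.map (fun p => List.foldl (fun p i => List.foldl (fun p j =>
            pvE [i, j] sym "|" p) p [y - 1, y, y + 1]) p [x - 1, x, x + 1])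
      ∧ (List.foldl (fun d i => List.foldl (fun d j =>
          match d.get? [i, j] with
          | some w => if w ≠ sym then d.insert [i, j] "|" else d
          | none => d) d [y - 1, y, y + 1]) dd [x - 1, x, x + 1]).keys = dd.keys :=
    fun dd hdd => pvMapish_foldl _ _ _
      (fun i _ => pvMapish_foldl _ _ _ (fun j _ => pvMapish_CU [i, j] sym "|")) dd hdd
  have h2 : ∀ dd : PySem.Dict (List Int) String, dd.keys.Nodup →
      (List.foldl (fun d j => List.foldl (fun d i =>
          match d.get? [i, j] with
          | some w => if w ≠ sym then d.insert [i, j] wall else d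
          | none => d) d [x - 1, x + 1]) dd [y - 1, y, y + 1]).items
        = dd.items.map (fun p => List.foldl (fun p j => List.foldl (fun p i =>
            pvE [i, j] sym wall p) p [x - 1, x + 1]) p [y - 1, y, y + 1]) :=
    fun dd hdd => (pvMapish_foldl _ _ _
      (fun j _ => pvMapish_foldl _ _ _ (fun i _ => pvMapish_CU [i, j] sym wall)) dd hdd).1
  have h3 : ∀ dd : PySem.Dict (List Int) String, dd.keys.Nodup →
      (List.foldl (fun d i => List.foldl (fun d j =>
          match d.get? [i, j] with
          | some w => if w ≠ sym then d.insert [i, j] (if i ≠ x then wall else "|") else d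
          | none => d) d [y - 1, y, y + 1]) dd [x - 1, x, x + 1]).items
        = dd.items.map (fun p => List.foldl (fun p i => List.foldl (fun p j =>
            pvE [i, j] sym (if i ≠ x then wall else "|") p) p [y - 1, y, y + 1]) p [x - 1, x, x + 1]) :=
    fun dd hdd => (pvMapish_foldl _ _ _
      (fun i _ => pvMapish_foldl _ _ _
        (fun j _ => pvMapish_CU [i, j] sym (if i ≠ x then wall else "|"))) dd hdd).1
  rw [h2 _ (by rw [(h1 d hnd).2]; exact hnd), (h1 d hnd).1, h3 d hnd, List.map_map]
  refine List.map_congr_left (fun p _ => ?_)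
  obtain ⟨kk, w⟩ := p
  simp only [Function.comp, List.foldl_cons, List.foldl_nil]
  have f1 : ¬ (x - 1 = x) := by omega
  have f2 : ¬ (x = x - 1) := by omega
  have f3 : ¬ (x + 1 = x) := by omega
  have f4 : ¬ (x = x + 1) := by omega
  have f5 : ¬ (x - 1 = x + 1) := by omega
  have f6 : ¬ (x + 1 = x - 1) := by omega
  have g1 : ¬ (y - 1 = y) := by omega
  have g2 : ¬ (y = y - 1) := by omega
  have g3 : ¬ (y + 1 = y) := by omega
  have g4 : ¬ (y = y + 1) := by omega
  have g5 : ¬ (y - 1 = y + 1) := by omega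
  have g6 : ¬ (y + 1 = y - 1) := by omega
  by_cases hw : w = sym
  · simp [hw, pvE_stay]
  · rcases kk with _ | ⟨i, _ | ⟨j, _ | ⟨c, t⟩⟩⟩
    · simp [pvE_miss]
    · simp [pvE_miss]
    · by_cases hi1 : i = x - 1 <;> by_cases hi2 : i = x <;> by_cases hi3 : i = x + 1 <;>
        by_cases hj1 : j = y - 1 <;> by_cases hj2 : j = y <;> by_cases hj3 : j = y + 1 <;>
        first
          | (exfalso; omega)
          | simp [pvE_hit, pvE_miss, hw, hds, hi1, hi2, hi3, hj1, hj2, hj3,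
                  f1, f2, f3, f4, f5, f6, g1, g2, g3, g4, g5, g6, List.cons.injEq]
    · simp [pvE_miss]

def pvStepA (d : PySem.Dict (List Int) String) (k : List Int) : PySem.Dict (List Int) String :=
  match k with
  | [x, y] =>
    let location := d.getD k ""
    if location = "hospital" then pv_update_surroundings (d.insert k "H") x y "|" "+" "H"
    else if location = "school" then pv_update_surroundings (d.insert k "S") x y "|" "-" "S"
    else if location = "park" then pv_update_surroundings (d.insert k "P") x y "|" "=" "P"
    else if location = "work" then pv_update_surroundings (d.insert k "W") x y "|" "~" "W"
    else d
  | _ => d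

def pvStepB (d : PySem.Dict (List Int) String) (k : List Int) : PySem.Dict (List Int) String :=
  match k with
  | [] => d
  | [_] => d
  | [x, y] =>
    match pvSPEC.get? (d.getD k "") with
    | some (symbol, wall) => pv_mark_block (d.insert k symbol) x y symbol wall
    | none => d
  | _ :: _ :: _ :: _ => d

lemma pv_mark_block_keys (d : PySem.Dict (List Int) String) (x y : Int) (sym wall : String)
    (hnd : d.keys.Nodup) : (pv_mark_block d x y sym wall).keys = d.keys := by
  unfold pv_mark_block
  rw [pyRange3 x, pyRange3 y]
  exact (pvMapish_foldl _ _
    (fun p i => List.foldl (fun p j => pvE [i, j] sym (if i ≠ x then wall else "|") p) p [y - 1, y, y + 1])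
    (fun i _ => pvMapish_foldl _ _ _
      (fun j _ => pvMapish_CU [i, j] sym (if i ≠ x then wall else "|"))) d hnd).2

lemma pv_step_eq (d : PySem.Dict (List Int) String) (k : List Int)
    (hnd : d.keys.Nodup) : pvStepA d k = pvStepB d k := by
  unfold pvStepA pvStepB
  rcases k with _ | ⟨x, _ | ⟨y, _ | ⟨c, t⟩⟩⟩
  · rfl
  · rfl
  · dsimp only
    by_cases h1 : d.getD [x, y] "" = "hospital"
    · rw [if_pos h1, h1, show pvSPEC.get? "hospital" = some ("H", "+") from rfl]
      exact pv_mark_eq _ x y "H" "+" (PySem.Dict.nodup_keys_insert _ _ _ hnd) (by decide)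
    · rw [if_neg h1]
      by_cases h2 : d.getD [x, y] "" = "school"
      · rw [if_pos h2, h2, show pvSPEC.get? "school" = some ("S", "-") from rfl]
        exact pv_mark_eq _ x y "S" "-" (PySem.Dict.nodup_keys_insert _ _ _ hnd) (by decide)
      · rw [if_neg h2]
        by_cases h3 : d.getD [x, y] "" = "park"
        · rw [if_pos h3, h3, show pvSPEC.get? "park" = some ("P", "=") from rfl]
          exact pv_mark_eq _ x y "P" "=" (PySem.Dict.nodup_keys_insert _ _ _ hnd) (by decide)
        · rw [if_neg h3]
          by_cases h4 : d.getD [x, y] "" = "work"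
          · rw [if_pos h4, h4, show pvSPEC.get? "work" = some ("W", "~") from rfl]
            exact pv_mark_eq _ x y "W" "~" (PySem.Dict.nodup_keys_insert _ _ _ hnd) (by decide)
          · rw [if_neg h4]
            have hn : pvSPEC.get? (d.getD [x, y] "") = none := by
              rw [PySem.Dict.get?_eq_none_iff_not_mem_keys]
              simp [pvSPEC, PySem.Dict.keys_mk, h1, h2, h3, h4]
            rw [hn]
  · rfl

lemma pv_step_keys (d : PySem.Dict (List Int) String) (k : List Int)
    (hk : k ∈ d.keys) (hnd : d.keys.Nodup) : (pvStepB d k).keys = d.keys := by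
  unfold pvStepB
  rcases k with _ | ⟨x, _ | ⟨y, _ | ⟨c, t⟩⟩⟩
  · rfl
  · rfl
  · dsimp only
    cases hs : pvSPEC.get? (d.getD [x, y] "") with
    | none => rfl
    | some sw =>
      obtain ⟨symbol, wall⟩ := sw
      rw [pv_mark_block_keys _ x y symbol wall (PySem.Dict.nodup_keys_insert _ _ _ hnd),
          PySem.Dict.keys_insert_of_contains _ _ ((PySem.Dict.contains_iff_mem_keys d _).mpr hk)]
  · rfl

lemma pv_fold_eq (l : List (List Int)) (d : PySem.Dict (List Int) String)
    (hnd : d.keys.Nodup) (hmem : ∀ k ∈ l, k ∈ d.keys) :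
    List.foldl pvStepA d l = List.foldl pvStepB d l := by
  induction l generalizing d with
  | nil => rfl
  | cons a l ih =>
    simp only [List.foldl_cons]
    have hkeys := pv_step_keys d a (hmem a List.mem_cons_self) hnd
    rw [pv_step_eq d a hnd]
    exact ih _ (by rw [hkeys]; exact hnd)
      (fun k hkl => by rw [hkeys]; exact hmem k (List.mem_cons_of_mem a hkl))

-- ===== VERDICT (by name: the statement is the Claim_ definition above) =====
theorem generate_game_map_spec : Claim_equal_generate_game_map := by
  intro gb _hdom hpre
  unfold Spec_generate_game_map generate_game_map generate_game_map_alt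
  dsimp only
  have hnd : (PySem.Dict.mk gb : PySem.Dict (List Int) String).keys.Nodup := by
    rw [PySem.Dict.keys_mk]
    exact hpre.1
  exact congrArg PySem.Dict.items (pv_fold_eq _ _ hnd (fun k hk => hk))
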